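-- pv_equiv track=rewrite | github.com/stym01/Amazon-ML-Challenge-2025 | dataset/extract4.py | extract_attributes
-- ===== SOURCE A (Python) =====
-- def extract_attributes(catalog_content):
--     """
--     Extracts Value, Unit, and Dataset_description from the catalog_content string.
--     """
--     value = None
--     unit = None
--     description_parts = []
--
--     if isinstance(catalog_content, str):
--         lines = catalog_content.strip().split('\n')
--         for line in lines:
--             if ':' in line:
--                 key, val = line.split(':', 1)
--                 key = key.strip()
--                 val = val.strip()
--                 if key.lower() == 'value':
--                     value = val
--                 elif key.lower() == 'unit':
--                     unit = val
--                 else: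
--                     description_parts.append(val)
--
--     description = ', '.join(description_parts)
--     return value, unit, description
-- ===== SOURCE B (Python) =====
-- def extract_attributes(catalog_content):
--     """
--     Extracts Value, Unit, and Dataset_description from the catalog_content string.
--     Table-based: one pass builds (key, val) pairs, then separate extraction passes.
--     """
--     pairs = []
--     if isinstance(catalog_content, str):
--         for line in catalog_content.strip().split('\n'):
--             if ':' in line:
--                 k, v = line.split(':', 1)
--                 pairs.append((k.strip().lower(), v.strip()))
--     value = next((v for k, v in reversed(pairs) if k == 'value'), None)
--     unit = next((v for k, v in reversed(pairs) if k == 'unit'), None)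
--     description = ', '.join(v for k, v in pairs if k not in ('value', 'unit'))
--     return value, unit, description
-- ===== Notes on version B (the rewrite author's own statement) =====
-- stated objective: alternative
-- what changed: Replaces the single routing loop with three mutable accumulators by one table-building pass into (key, val) pairs plus three separate extraction passes (reversed search for last 'value'/'unit', a filtered join for the description).
import Mathlib
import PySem

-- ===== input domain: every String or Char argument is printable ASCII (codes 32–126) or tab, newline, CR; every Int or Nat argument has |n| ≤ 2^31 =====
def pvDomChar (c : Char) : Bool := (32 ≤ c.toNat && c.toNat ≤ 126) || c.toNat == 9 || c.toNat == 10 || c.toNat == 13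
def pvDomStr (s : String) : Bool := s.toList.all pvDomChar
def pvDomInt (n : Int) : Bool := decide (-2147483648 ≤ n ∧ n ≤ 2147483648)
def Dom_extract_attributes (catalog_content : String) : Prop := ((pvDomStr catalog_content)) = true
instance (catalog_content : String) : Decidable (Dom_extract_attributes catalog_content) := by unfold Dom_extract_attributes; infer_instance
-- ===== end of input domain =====

-- B replaces A's single routing loop (three mutable accumulators) by a table-building pass
-- into (key, val) pairs plus three separate extraction passes; alternative decomposition, same cost.

-- ===== PORT A =====
-- the isinstance(catalog_content, str) guard is always true for a String argument
def pvStepA (st : Option String × Option String × List String) (line : String) :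
    Option String × Option String × List String :=
  if PySem.Str.isIn ":" line then
    match PySem.Str.splitMax? line ":" 1 with
    | some [k, v] =>
      let key := PySem.Str.strip k
      let val := PySem.Str.strip v
      if PySem.Str.lower key == "value" then (some val, st.2.1, st.2.2)
      else if PySem.Str.lower key == "unit" then (st.1, some val, st.2.2)
      else (st.1, st.2.1, st.2.2 ++ [val])
    | _ => st   -- unreachable: split(':',1) with ':' in line yields exactly two pieces
  else st

def extract_attributes (catalog_content : String) : Option String × Option String × String :=
  let lines := (PySem.Str.split? (PySem.Str.strip catalog_content) "\n").getD []
  let st := lines.foldl pvStepA (none, none, [])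
  (st.1, st.2.1, PySem.Str.join ", " st.2.2)

-- ===== PORT B =====
def pvParsePair (line : String) : Option (String × String) :=
  if PySem.Str.isIn ":" line then
    match PySem.Str.splitMax? line ":" 1 with
    | some [k, v] => some (PySem.Str.lower (PySem.Str.strip k), PySem.Str.strip v)
    | _ => none   -- unreachable, as above
  else none

def extract_attributes_alt (catalog_content : String) : Option String × Option String × String :=
  let pairs := ((PySem.Str.split? (PySem.Str.strip catalog_content) "\n").getD []).filterMap pvParsePair
  let value := (pairs.reverse.find? (fun p => p.1 == "value")).map Prod.snd
  let unit := (pairs.reverse.find? (fun p => p.1 == "unit")).map Prod.snd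
  let desc := PySem.Str.join ", "
      ((pairs.filter (fun p => !(p.1 == "value") && !(p.1 == "unit"))).map Prod.snd)
  (value, unit, desc)

-- ===== PRECONDITION & SPEC =====
def Spec_extract_attributes (catalog_content : String) (out : Option String × Option String × String) : Prop := out = extract_attributes_alt catalog_content
instance (catalog_content : String) (out : Option String × Option String × String) : Decidable (Spec_extract_attributes catalog_content out) := by unfold Spec_extract_attributes; infer_instance

-- ===== CLAIM (what is proved, stated in full; the proofs are below) =====
def Claim_equal_extract_attributes : Prop := ∀ (catalog_content : String), Dom_extract_attributes catalog_content → Spec_extract_attributes catalog_content (extract_attributes catalog_content)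

-- ===== LEMMAS AND PROOFS =====

theorem pvStepA_of_none (line : String) (st : Option String × Option String × List String)
    (h : pvParsePair line = none) : pvStepA st line = st := by
  unfold pvParsePair at h
  unfold pvStepA
  by_cases hc : PySem.Str.isIn ":" line = true
  · rw [if_pos hc] at h ⊢
    cases hs : PySem.Str.splitMax? line ":" 1 with
    | none => rfl
    | some parts =>
      rw [hs] at h
      rcases parts with _ | ⟨k, _ | ⟨v, _ | ⟨w, t⟩⟩⟩
      · rfl
      · rfl
      · simp at h
      · rfl
  · rw [if_neg hc]

theorem pvStepA_of_some (line key val : String) (st : Option String × Option String × List String)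
    (h : pvParsePair line = some (key, val)) :
    pvStepA st line =
      if key == "value" then (some val, st.2.1, st.2.2)
      else if key == "unit" then (st.1, some val, st.2.2)
      else (st.1, st.2.1, st.2.2 ++ [val]) := by
  unfold pvParsePair at h
  unfold pvStepA
  by_cases hc : PySem.Str.isIn ":" line = true
  · rw [if_pos hc] at h ⊢
    cases hs : PySem.Str.splitMax? line ":" 1 with
    | none => rw [hs] at h; simp at h
    | some parts =>
      rw [hs] at h
      rcases parts with _ | ⟨k, _ | ⟨v, _ | ⟨w, t⟩⟩⟩
      · simp at h
      · simp at h
      · simp only [Option.some.injEq, Prod.mk.injEq] at h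
        obtain ⟨hk, hv⟩ := h
        subst hk; subst hv
        rfl
      · simp at h
  · rw [if_neg hc] at h; simp at h

-- loop invariant: A's fold over the lines equals B's three extractions over the pair table,
-- merged with the incoming accumulator state
theorem pv_fold_eq (lines : List String) (v u : Option String) (ps : List String) :
    lines.foldl pvStepA (v, u, ps) =
      ((((lines.filterMap pvParsePair).reverse.find? (fun p => p.1 == "value")).map Prod.snd).or v,
       (((lines.filterMap pvParsePair).reverse.find? (fun p => p.1 == "unit")).map Prod.snd).or u,
       ps ++ ((lines.filterMap pvParsePair).filter
          (fun p => !(p.1 == "value") && !(p.1 == "unit"))).map Prod.snd) := by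
  induction lines generalizing v u ps with
  | nil => simp
  | cons line rest ih =>
    rw [List.foldl_cons]
    cases hp : pvParsePair line with
    | none =>
      rw [pvStepA_of_none line _ hp, ih]
      simp [hp]
    | some p =>
      obtain ⟨key, val⟩ := p
      rw [pvStepA_of_some line key val _ hp]
      by_cases h1 : key = "value"
      · subst h1
        simp only [BEq.rfl, if_pos]
        rw [ih]
        refine Prod.ext ?_ (Prod.ext ?_ ?_) <;>
          simp [hp, List.find?_append] <;>
          cases List.find? (fun p => p.1 == "value") (List.filterMap pvParsePair rest).reverse <;>
          simp
      · by_cases h2 : key = "unit"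
        · subst h2
          simp only [BEq.rfl, if_pos, if_neg (by simp : ¬ (("unit" : String) == "value") = true)]
          rw [ih]
          refine Prod.ext ?_ (Prod.ext ?_ ?_) <;>
            simp [hp, List.find?_append] <;>
            cases List.find? (fun p => p.1 == "unit") (List.filterMap pvParsePair rest).reverse <;>
            simp
        · rw [if_neg (by simpa using h1), if_neg (by simpa using h2), ih]
          refine Prod.ext ?_ (Prod.ext ?_ ?_) <;>
            simp [hp, List.find?_append, h1, h2]

-- ===== VERDICT (by name: the statement is the Claim_ definition above) =====
theorem extract_attributes_spec : Claim_equal_extract_attributes := by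
  intro s _
  unfold Spec_extract_attributes extract_attributes extract_attributes_alt
  simp only [pv_fold_eq]
  simp
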